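-- pv_equiv track=rewrite | github.com/graphext/lector | lector/utils.py | uniquify
-- ===== SOURCE A (Python) =====
-- from collections.abc import Callable, Iterator, Sequence
--
-- def uniquify(items: Sequence[str]) -> Iterator[str]:
--     """Add suffixes to inputs strings if necessary to ensure is item is unique."""
--     seen = set()
--
--     for item in items:
--         newitem = item
--
--         suffix = 0
--         while newitem in seen:
--             suffix += 1
--             newitem = f"{item}_{suffix}"
--
--         seen.add(newitem)
--         yield newitem
-- ===== SOURCE B (Python) =====
-- def uniquify(items):
--     """Add suffixes to inputs strings if necessary to ensure is item is unique."""
--     seen = set()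
--     nxt = {}  # per base string: the next suffix worth trying
--
--     for item in items:
--         if item not in seen:
--             newitem = item
--         else:
--             k = nxt.get(item, 1)
--             while f"{item}_{k}" in seen:
--                 k += 1
--             newitem = f"{item}_{k}"
--             nxt[item] = k + 1
--
--         seen.add(newitem)
--         yield newitem
-- ===== Notes on version B (the rewrite author's own statement) =====
-- stated objective: faster
-- what changed: B caches, per base string, the next suffix worth trying in a dict, so duplicate runs resume where the previous search stopped instead of rescanning suffixes 1..k from scratch on every repetition; the seen-set check is kept so explicitly listed names like 'a_1' are still skipped exactly as A does.
import Mathlib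
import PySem

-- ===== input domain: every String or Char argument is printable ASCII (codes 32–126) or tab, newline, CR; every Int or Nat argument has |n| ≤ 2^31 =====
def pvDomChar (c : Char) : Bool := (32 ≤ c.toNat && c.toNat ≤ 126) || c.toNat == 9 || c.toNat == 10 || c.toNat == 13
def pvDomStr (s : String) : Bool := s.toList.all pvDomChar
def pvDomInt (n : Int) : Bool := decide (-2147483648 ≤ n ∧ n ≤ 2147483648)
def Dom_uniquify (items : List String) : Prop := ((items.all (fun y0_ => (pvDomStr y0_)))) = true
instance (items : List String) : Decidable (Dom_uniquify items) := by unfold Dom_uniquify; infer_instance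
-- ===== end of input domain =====

-- B replaces A's per-item rescan of suffixes 1..k by a dict caching, per base string, the next
-- suffix worth trying (the seen-set check is kept), making B asymptotically faster on duplicates.

-- f"{item}_{k}" — exact: PySem.Int.toChars k = str(k)
def pvCand (item : String) (k : Int) : String :=
  String.ofList (item.toList ++ '_' :: PySem.Int.toChars k)

-- ===== PORT A =====
-- A's inner 'while newitem in seen: suffix += 1; newitem = f"{item}_{suffix}"' loop;
-- fuel seen.length + 1 provably suffices (the candidates are pairwise distinct strings).
def uniquifyLoop (seen : PySem.Set String) (item : String) :
    Int → String → Nat → Int × String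
  | suffix, newitem, 0 => (suffix, newitem)
  | suffix, newitem, f + 1 =>
      if PySem.Set.contains seen newitem then
        uniquifyLoop seen item (suffix + 1) (pvCand item (suffix + 1)) f
      else (suffix, newitem)

-- A collects its yields in order (the generator consumed as a list)
def uniquifyGo (seen : PySem.Set String) : List String → List String
  | [] => []
  | item :: rest =>
      let ni := (uniquifyLoop seen item 0 item (seen.length + 1)).2
      ni :: uniquifyGo (PySem.Set.add seen ni) rest

def uniquify (items : List String) : List String :=
  uniquifyGo PySem.Set.empty items

-- ===== PORT B =====
-- B's 'while f"{item}_{k}" in seen: k += 1' loop (same fuel bound)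
def altLoop (seen : PySem.Set String) (item : String) : Int → Nat → Int
  | k, 0 => k
  | k, f + 1 =>
      if PySem.Set.contains seen (pvCand item k) then altLoop seen item (k + 1) f else k

def altGo (seen : PySem.Set String) (nxt : PySem.Dict String Int) :
    List String → List String
  | [] => []
  | item :: rest =>
      if PySem.Set.contains seen item then
        let k := altLoop seen item (nxt.getD item 1) (seen.length + 1)
        let ni := pvCand item k
        ni :: altGo (PySem.Set.add seen ni) (nxt.insert item (k + 1)) rest
      else
        item :: altGo (PySem.Set.add seen item) nxt rest

def uniquify_alt (items : List String) : List String :=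
  altGo PySem.Set.empty PySem.Dict.empty items

-- ===== PRECONDITION & SPEC =====
def Spec_uniquify (items : List String) (out : List String) : Prop := out = uniquify_alt items
instance (items : List String) (out : List String) : Decidable (Spec_uniquify items out) := by unfold Spec_uniquify; infer_instance

-- ===== CLAIM (what is proved, stated in full; the proofs are below) =====
def Claim_equal_uniquify : Prop := ∀ (items : List String), Dom_uniquify items → Spec_uniquify items (uniquify items)

-- ===== LEMMAS AND PROOFS =====

-- ---- injectivity of Nat.toDigits 10 (str() on naturals), needed for loop-termination pigeonhole ----
theorem pvCore_shift (b : Nat) (f : Nat) : ∀ (n : Nat) (ds : List Char),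
    Nat.toDigitsCore b f n ds = Nat.toDigitsCore b f n [] ++ ds := by
  induction f with
  | zero => intro n ds; simp [Nat.toDigitsCore]
  | succ f ih =>
    intro n ds
    simp only [Nat.toDigitsCore]
    by_cases h : n / b = 0
    · simp [h]
    · simp only [h, if_false]
      rw [ih (n / b) (Nat.digitChar (n % b) :: ds), ih (n / b) [Nat.digitChar (n % b)]]
      simp

theorem pvCore_fuel (b : Nat) (hb : 2 ≤ b) : ∀ (n f₁ f₂ : Nat), n < b ^ f₁ → n < b ^ f₂ →
    0 < f₁ → 0 < f₂ → Nat.toDigitsCore b f₁ n [] = Nat.toDigitsCore b f₂ n [] := by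
  intro n
  induction n using Nat.strong_induction_on with
  | _ n ih =>
    intro f₁ f₂ h1 h2 hp1 hp2
    obtain ⟨g₁, rfl⟩ : ∃ g, f₁ = g + 1 := ⟨f₁ - 1, by omega⟩
    obtain ⟨g₂, rfl⟩ : ∃ g, f₂ = g + 1 := ⟨f₂ - 1, by omega⟩
    simp only [Nat.toDigitsCore]
    by_cases h : n / b = 0
    · simp [h]
    · simp only [h, if_false]
      rw [pvCore_shift b g₁, pvCore_shift b g₂]
      congr 1
      have hnb : 0 < n := by
        rcases Nat.eq_zero_or_pos n with rfl | hn
        · simp [Nat.zero_div] at h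
        · exact hn
      have hd : n / b < n := Nat.div_lt_self hnb hb
      have hg1 : 0 < g₁ := by
        by_contra hg
        have hz : g₁ = 0 := by omega
        subst hz
        exact h (Nat.div_eq_of_lt (by simpa using h1))
      have hg2 : 0 < g₂ := by
        by_contra hg
        have hz : g₂ = 0 := by omega
        subst hz
        exact h (Nat.div_eq_of_lt (by simpa using h2))
      apply ih (n / b) hd
      · exact Nat.div_lt_of_lt_mul (by rwa [← Nat.pow_succ'])
      · exact Nat.div_lt_of_lt_mul (by rwa [← Nat.pow_succ'])
      · exact hg1
      · exact hg2

theorem pvRep_lt {n : Nat} (h : n < 10) : Nat.toDigits 10 n = [Nat.digitChar n] := by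
  have hd : n / 10 = 0 := Nat.div_eq_of_lt h
  have hm : n % 10 = n := Nat.mod_eq_of_lt h
  simp [Nat.toDigits, Nat.toDigitsCore, hd, hm]

theorem pvRep_ge {n : Nat} (h : 10 ≤ n) :
    Nat.toDigits 10 n = Nat.toDigits 10 (n / 10) ++ [Nat.digitChar (n % 10)] := by
  have hd : n / 10 ≠ 0 := by
    intro hz; have := Nat.lt_of_div_eq_zero (by norm_num) hz; omega
  have h1 : Nat.toDigits 10 n = Nat.toDigitsCore 10 n (n / 10) [] ++ [Nat.digitChar (n % 10)] := by
    obtain ⟨g, rfl⟩ : ∃ g, n = g + 1 := ⟨n - 1, by omega⟩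
    simp only [Nat.toDigits, Nat.toDigitsCore, hd, if_false]
    exact pvCore_shift 10 (g + 1) ((g + 1) / 10) [Nat.digitChar ((g + 1) % 10)]
  rw [h1]
  congr 1
  have hp1 : n / 10 < 10 ^ (n / 10) := Nat.lt_pow_self (by norm_num : (1:ℕ) < 10)
  have hp2 : n / 10 < 10 ^ n :=
    lt_of_lt_of_le hp1 (Nat.pow_le_pow_right (by norm_num) (Nat.div_le_self n 10))
  have hp3 : n / 10 < 10 ^ (n / 10 + 1) :=
    lt_of_lt_of_le hp1 (Nat.pow_le_pow_right (by norm_num) (by omega))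
  exact pvCore_fuel 10 (by norm_num) (n / 10) n (n / 10 + 1) hp2 hp3 (by omega) (by omega)

theorem pvToDigits_ne_nil (n : Nat) : Nat.toDigits 10 n ≠ [] := by
  by_cases h : n < 10
  · rw [pvRep_lt h]; simp
  · rw [pvRep_ge (by omega)]; simp

theorem pvDigitChar_inj {a b : Nat} (ha : a < 10) (hb : b < 10)
    (h : Nat.digitChar a = Nat.digitChar b) : a = b := by
  have key : ∀ x : Fin 10, ∀ y : Fin 10, Nat.digitChar x.val = Nat.digitChar y.val → x = y := by
    decide
  have := key ⟨a, ha⟩ ⟨b, hb⟩ h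
  simpa using congrArg Fin.val this

theorem pvToDigits_ten_inj : ∀ m : Nat, ∀ n : Nat,
    Nat.toDigits 10 m = Nat.toDigits 10 n → m = n := by
  intro m
  induction m using Nat.strong_induction_on with
  | _ m ih =>
    intro n h
    by_cases hm : m < 10 <;> by_cases hn : n < 10
    · rw [pvRep_lt hm, pvRep_lt hn] at h
      exact pvDigitChar_inj hm hn (by simpa using h)
    · rw [pvRep_lt hm, pvRep_ge (by omega)] at h
      have hL := congrArg List.length h
      rw [List.length_append] at hL
      simp only [List.length_singleton] at hL
      have hlen : 0 < (Nat.toDigits 10 (n / 10)).length :=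
        List.length_pos_of_ne_nil (pvToDigits_ne_nil (n / 10))
      omega
    · rw [pvRep_ge (by omega), pvRep_lt hn] at h
      have hL := congrArg List.length h
      rw [List.length_append] at hL
      simp only [List.length_singleton] at hL
      have hlen : 0 < (Nat.toDigits 10 (m / 10)).length :=
        List.length_pos_of_ne_nil (pvToDigits_ne_nil (m / 10))
      omega
    · rw [pvRep_ge (by omega), pvRep_ge (show 10 ≤ n by omega)] at h
      obtain ⟨h1, h2⟩ := List.append_inj' h rfl
      have hdiv : m / 10 = n / 10 := ih (m / 10) (Nat.div_lt_self (by omega) (by norm_num)) _ h1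
      have hmod : m % 10 = n % 10 :=
        pvDigitChar_inj (Nat.mod_lt _ (by norm_num)) (Nat.mod_lt _ (by norm_num)) (by simpa using h2)
      omega

-- ---- candidate strings: the k-th candidate (k = 0 is the bare item) and its injectivity ----
def pvCandAt (item : String) (k : Int) : String := if k = 0 then item else pvCand item k

theorem pvCand_inj {item : String} {a b : Int} (ha : 1 ≤ a) (hb : 1 ≤ b)
    (h : pvCand item a = pvCand item b) : a = b := by
  have hl := congrArg String.toList h
  simp only [pvCand, String.toList_ofList] at hl
  have hc : PySem.Int.toChars a = PySem.Int.toChars b := by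
    have := List.append_cancel_left hl
    exact List.cons.inj this |>.2
  simp only [PySem.Int.toChars, if_neg (by omega : ¬ a < 0), if_neg (by omega : ¬ b < 0)] at hc
  have := pvToDigits_ten_inj _ _ hc
  omega

theorem pvCand_ne_item {item : String} {a : Int} : pvCand item a ≠ item := by
  intro h
  have hl := congrArg (fun s => s.toList.length) h
  simp only [pvCand, String.toList_ofList, List.length_append, List.length_cons] at hl
  omega

theorem pvCandAt_inj {item : String} {a b : Int} (ha : 0 ≤ a) (hb : 0 ≤ b)
    (h : pvCandAt item a = pvCandAt item b) : a = b := by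
  unfold pvCandAt at h
  split_ifs at h with h1 h2 h2
  · omega
  · exact absurd h.symm pvCand_ne_item
  · exact absurd h pvCand_ne_item
  · exact pvCand_inj (by omega) (by omega) h

-- ---- pigeonhole: starting anywhere, within seen.length + 1 candidates one is free ----
theorem pvExists_free (seen : PySem.Set String) (item : String)
    (k : Int) (hk : 0 ≤ k)
    (hall : ∀ j, k ≤ j → j < k + (seen.length + 1) →
      PySem.Set.contains seen (pvCandAt item j) = true) : False := by
  set L := seen.length with hL
  have hnodup : ((List.range (L + 1)).map (fun i : Nat => pvCandAt item (k + (i : Int)))).Nodup := by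
    refine List.Nodup.map_on ?_ (List.nodup_range)
    intro x _ y _ hxy
    have := pvCandAt_inj (by omega) (by omega) hxy
    omega
  have hsub : ((List.range (L + 1)).map (fun i : Nat => pvCandAt item (k + (i : Int)))) ⊆ seen := by
    intro x hx
    simp only [List.mem_map, List.mem_range] at hx
    obtain ⟨i, hi, rfl⟩ := hx
    have := hall (k + i) (by omega) (by omega)
    exact (PySem.Set.contains_iff seen _).mp this
  have hlen : ((List.range (L + 1)).map (fun i : Nat => pvCandAt item (k + (i : Int)))).length ≤ L := by
    calc ((List.range (L + 1)).map (fun i : Nat => pvCandAt item (k + (i : Int)))).length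
        = ((List.range (L + 1)).map (fun i : Nat => pvCandAt item (k + (i : Int)))).toFinset.card :=
          (List.toFinset_card_of_nodup hnodup).symm
      _ ≤ seen.toFinset.card := Finset.card_le_card (by
          intro x hx
          simp only [List.mem_toFinset] at *
          exact hsub hx)
      _ ≤ seen.length := seen.toFinset_card_le
  rw [List.length_map, List.length_range] at hlen
  omega

-- ---- loop characterisations: either the loop exits on the first free candidate, or fuel ran out ----
theorem pvLoopA_or (seen : PySem.Set String) (item : String) : ∀ (f : Nat) (k : Int), 0 ≤ k →
    ((k ≤ (uniquifyLoop seen item k (pvCandAt item k) f).1 ∧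
      (uniquifyLoop seen item k (pvCandAt item k) f).2
        = pvCandAt item (uniquifyLoop seen item k (pvCandAt item k) f).1 ∧
      PySem.Set.contains seen (uniquifyLoop seen item k (pvCandAt item k) f).2 = false ∧
      ∀ j, k ≤ j → j < (uniquifyLoop seen item k (pvCandAt item k) f).1 →
        PySem.Set.contains seen (pvCandAt item j) = true)
     ∨ ((uniquifyLoop seen item k (pvCandAt item k) f).1 = k + f ∧
        ∀ j, k ≤ j → j < k + f → PySem.Set.contains seen (pvCandAt item j) = true)) := by
  intro f
  induction f with
  | zero =>
    intro k hk
    right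
    refine ⟨by simp [uniquifyLoop], ?_⟩
    intro j h1 h2; omega
  | succ f ih =>
    intro k hk
    by_cases hc : PySem.Set.contains seen (pvCandAt item k) = true
    · have hstep : uniquifyLoop seen item k (pvCandAt item k) (f + 1)
          = uniquifyLoop seen item (k + 1) (pvCandAt item (k + 1)) f := by
        have hch : pvCand item (k + 1) = pvCandAt item (k + 1) := by
          unfold pvCandAt; rw [if_neg (by omega)]
        simp only [uniquifyLoop, hc, if_true, hch]
      rw [hstep]
      rcases ih (k + 1) (by omega) with hL | hR
      · left
        refine ⟨by omega, hL.2.1, hL.2.2.1, ?_⟩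
        intro j h1 h2
        rcases eq_or_lt_of_le h1 with rfl | hlt
        · exact hc
        · exact hL.2.2.2 j (by omega) h2
      · right
        refine ⟨by omega, ?_⟩
        intro j h1 h2
        rcases eq_or_lt_of_le h1 with rfl | hlt
        · exact hc
        · exact hR.2 j (by omega) (by omega)
    · left
      have hc' : PySem.Set.contains seen (pvCandAt item k) = false := by
        revert hc; cases PySem.Set.contains seen (pvCandAt item k) <;> simp
      have hres : uniquifyLoop seen item k (pvCandAt item k) (f + 1) = (k, pvCandAt item k) := by
        simp only [uniquifyLoop, hc', Bool.false_eq_true, if_false]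
      rw [hres]
      exact ⟨le_refl _, rfl, hc', fun j h1 h2 => absurd h2 (by omega)⟩

theorem pvLoopB_or (seen : PySem.Set String) (item : String) : ∀ (f : Nat) (k : Int),
    ((k ≤ altLoop seen item k f ∧
      PySem.Set.contains seen (pvCand item (altLoop seen item k f)) = false ∧
      ∀ j, k ≤ j → j < altLoop seen item k f →
        PySem.Set.contains seen (pvCand item j) = true)
     ∨ (altLoop seen item k f = k + f ∧
        ∀ j, k ≤ j → j < k + f → PySem.Set.contains seen (pvCand item j) = true)) := by
  intro f
  induction f with
  | zero =>
    intro k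
    right
    refine ⟨by simp [altLoop], ?_⟩
    intro j h1 h2; omega
  | succ f ih =>
    intro k
    by_cases hc : PySem.Set.contains seen (pvCand item k) = true
    · have hstep : altLoop seen item k (f + 1) = altLoop seen item (k + 1) f := by
        simp only [altLoop, hc, if_true]
      rw [hstep]
      rcases ih (k + 1) with hL | hR
      · left
        refine ⟨by omega, hL.2.1, ?_⟩
        intro j h1 h2
        rcases eq_or_lt_of_le h1 with rfl | hlt
        · exact hc
        · exact hL.2.2 j (by omega) h2
      · right
        refine ⟨by omega, ?_⟩
        intro j h1 h2
        rcases eq_or_lt_of_le h1 with rfl | hlt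
        · exact hc
        · exact hR.2 j (by omega) (by omega)
    · left
      have hc' : PySem.Set.contains seen (pvCand item k) = false := by
        revert hc; cases PySem.Set.contains seen (pvCand item k) <;> simp
      have hres : altLoop seen item k (f + 1) = k := by
        simp only [altLoop, hc', Bool.false_eq_true, if_false]
      rw [hres]
      exact ⟨le_refl _, hc', fun j h1 h2 => absurd h2 (by omega)⟩

-- contains is monotone under Set.add
theorem pvContains_add (seen : PySem.Set String) (x y : String)
    (h : PySem.Set.contains seen y = true) :
    PySem.Set.contains (PySem.Set.add seen x) y = true := by
  rw [PySem.Set.contains_iff] at *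
  exact (PySem.Set.mem_add seen x y).mpr (Or.inl h)

theorem pvContains_add_self (seen : PySem.Set String) (x : String) :
    PySem.Set.contains (PySem.Set.add seen x) x = true := by
  rw [PySem.Set.contains_iff]
  exact (PySem.Set.mem_add seen x x).mpr (Or.inr rfl)

-- ---- the main simulation: A's and B's generators agree from any related pair of states ----
theorem pvGo_eq : ∀ (items : List String) (seen : PySem.Set String) (nxt : PySem.Dict String Int),
    (∀ b : String, 1 ≤ nxt.getD b 1) →
    (∀ b : String, ∀ j : Int, 1 ≤ j → j < nxt.getD b 1 →
      PySem.Set.contains seen (pvCand b j) = true) →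
    uniquifyGo seen items = altGo seen nxt items := by
  intro items
  induction items with
  | nil => intro seen nxt _ _; rfl
  | cons item rest ih =>
    intro seen nxt hge1 hinv
    by_cases hmem : PySem.Set.contains seen item = true
    · -- the duplicate case: both run their search loop; the results coincide
      have hA := pvLoopA_or seen item (seen.length + 1) 0 (le_refl 0)
      have hB := pvLoopB_or seen item (seen.length + 1) (nxt.getD item 1)
      have hitem : pvCandAt item 0 = item := by simp [pvCandAt]
      rw [hitem] at hA
      rcases hA with hAL | hAR
      · rcases hB with hBL | hBR
        · simp only [uniquifyGo, altGo, hmem, if_true]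
          generalize hTA : uniquifyLoop seen item 0 item (seen.length + 1) = rA at hAL ⊢
          generalize hTB : altLoop seen item (nxt.getD item 1) (seen.length + 1) = kB at hBL ⊢
          obtain ⟨hA1, hA2, hA3, hA4⟩ := hAL
          obtain ⟨hB1, hB2, hB3⟩ := hBL
          have hm1 : 1 ≤ nxt.getD item 1 := hge1 item
          -- A's loop cannot stop at suffix 0 (the item itself is taken)
          have hA1pos : 1 ≤ rA.1 := by
            rcases eq_or_lt_of_le hA1 with heq0 | h1
            · exfalso
              rw [hA2, ← heq0, hitem, hmem] at hA3
              exact absurd hA3 (by simp)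
            · omega
          have hAcand : pvCandAt item rA.1 = pvCand item rA.1 := by
            unfold pvCandAt; rw [if_neg (by omega)]
          have hAfree : PySem.Set.contains seen (pvCand item rA.1) = false := by
            rw [hA2, hAcand] at hA3; exact hA3
          -- rA.1 is at least the cached start (everything below it is known taken)
          have hge_m : nxt.getD item 1 ≤ rA.1 := by
            by_contra hlt
            have hj : PySem.Set.contains seen (pvCand item rA.1) = true :=
              hinv item rA.1 hA1pos (by omega)
            rw [hj] at hAfree; exact absurd hAfree (by simp)
          -- both loops stop at the least free suffix, hence at the same one
          have heq : rA.1 = kB := by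
            rcases lt_trichotomy rA.1 kB with hlt | heqv | hgt
            · have := hB3 rA.1 hge_m hlt
              rw [this] at hAfree; exact absurd hAfree (by simp)
            · exact heqv
            · have hBpos : (1 : Int) ≤ kB := by omega
              have hBin : PySem.Set.contains seen (pvCandAt item kB) = true :=
                hA4 kB (by omega) hgt
              have hBcand : pvCandAt item kB = pvCand item kB := by
                unfold pvCandAt; rw [if_neg (by omega)]
              rw [hBcand] at hBin
              rw [hBin] at hB2; exact absurd hB2 (by simp)
          have hni : rA.2 = pvCand item kB := by
            rw [hA2, heq]
            unfold pvCandAt; rw [if_neg (by omega)]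
          rw [hni]
          congr 1
          apply ih
          · -- the cached values stay ≥ 1
            intro b
            by_cases hb : b = item
            · subst hb
              rw [PySem.Dict.getD_insert_self nxt _ (kB + 1) 1]
              omega
            · rw [PySem.Dict.getD_insert_of_ne nxt (kB + 1) 1 hb]
              exact hge1 b
          · -- the cached-suffix invariant is preserved
            intro b j hj1 hj2
            by_cases hb : b = item
            · subst hb
              rw [PySem.Dict.getD_insert_self nxt _ (kB + 1) 1] at hj2
              rcases lt_trichotomy j kB with hlt | heqv | hgt
              · rcases lt_or_ge j (nxt.getD b 1) with hjm | hjm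
                · exact pvContains_add _ _ _ (hinv _ j hj1 (by omega))
                · exact pvContains_add _ _ _ (hB3 j hjm hlt)
              · subst heqv
                exact pvContains_add_self _ _
              · omega
            · rw [PySem.Dict.getD_insert_of_ne nxt (kB + 1) 1 hb] at hj2
              exact pvContains_add _ _ _ (hinv b j hj1 hj2)
        · -- B's loop cannot exhaust its fuel
          exfalso
          apply pvExists_free seen item (nxt.getD item 1) (by have := hge1 item; omega)
          intro j h1 h2
          have hcand : pvCandAt item j = pvCand item j := by
            unfold pvCandAt; rw [if_neg (by have := hge1 item; omega)]
          rw [hcand]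
          exact hBR.2 j h1 h2
      · -- A's loop cannot exhaust its fuel
        exfalso
        exact pvExists_free seen item 0 (le_refl 0)
          (fun j h1 h2 => hAR.2 j h1 (by omega))
    · -- fresh item: A's loop exits immediately, B takes the fresh branch
      have hmem' : PySem.Set.contains seen item = false := by
        revert hmem; cases PySem.Set.contains seen item <;> simp
      have hnotmem : item ∉ seen := fun hin => hmem ((PySem.Set.contains_iff seen item).mpr hin)
      have hA : (uniquifyLoop seen item 0 item (seen.length + 1)).2 = item := by
        simp [uniquifyLoop, hnotmem]
      simp only [uniquifyGo, altGo, hmem', Bool.false_eq_true, if_false, hA]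
      congr 1
      exact ih (PySem.Set.add seen item) nxt hge1
        (fun b j hj1 hj2 => pvContains_add _ _ _ (hinv b j hj1 hj2))

-- ===== VERDICT (by name: the statement is the Claim_ definition above) =====
theorem uniquify_spec : Claim_equal_uniquify := by
  intro items _
  unfold Spec_uniquify uniquify uniquify_alt
  apply pvGo_eq
  · intro b; exact le_refl 1
  · intro b j hj1 hj2
    simp [PySem.Dict.getD, PySem.Dict.get?, PySem.Dict.empty] at hj2
    omega
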